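-- pv_equiv track=rewrite | github.com/mattmccutch/English-to-TeReoMaori-Translator | englishToMaori.py | parse_tense
-- ===== SOURCE A (Python) =====
-- english_to_maori_tense = {
--     "wants": "Kei te",
--     "went": "I",
--     "going": "Kei te",
--     "made": "I",
--     "making": "Kei te",
--     "saw": "I",
--     "seeing": "Kei te",
--     "wanted": "I",
--     "want": "Kei te",
--     "called": "I",
--     "calling": "Kei te",
--     "asked": "I",
--     "asking": "Kei te",
--     "read": "I",
--     "reading": "Kei te",
--     "learned": "I",
--     "learning": "Kei te",
-- }
--
-- def parse_tense(sentence):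
--     words = sentence.split()
--     tense = None
--     if "will" in words:
--         tense = "Ka"
--     elif "am" in words:
--         tense = "Kei te"
--     elif "are" in words:
--         tense = "Kei te"
--     elif "is" in words:
--         tense = "Kei te"
--     else:
--         for word in words:
--             if word in english_to_maori_tense:
--                 tense = english_to_maori_tense[word]
--     return tense
-- ===== SOURCE B (Python) =====
-- english_to_maori_tense = {
--     "wants": "Kei te",
--     "went": "I",
--     "going": "Kei te",
--     "made": "I",
--     "making": "Kei te",
--     "saw": "I",
--     "seeing": "Kei te",
--     "wanted": "I",
--     "want": "Kei te",
--     "called": "I",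
--     "calling": "Kei te",
--     "asked": "I",
--     "asking": "Kei te",
--     "read": "I",
--     "reading": "Kei te",
--     "learned": "I",
--     "learning": "Kei te",
-- }
--
-- def parse_tense(sentence):
--     # single pass: gather flags and the last dictionary match, then decide by priority
--     seen_will = False
--     seen_aux = False
--     last_tense = None
--     for word in sentence.split():
--         if word == "will":
--             seen_will = True
--         elif word == "am" or word == "are" or word == "is":
--             seen_aux = True
--         else:
--             t = english_to_maori_tense.get(word)
--             if t is not None:
--                 last_tense = t
--     if seen_will:
--         return "Ka"
--     if seen_aux:
--         return "Kei te"
--     return last_tense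
-- ===== Notes on version B (the rewrite author's own statement) =====
-- stated objective: alternative
-- what changed: B replaces A's four separate membership scans over the word list followed by a dictionary loop with a single pass that accumulates three pieces of state (seen_will, seen_aux, last dictionary match) and decides the result by priority afterwards.
import Mathlib
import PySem

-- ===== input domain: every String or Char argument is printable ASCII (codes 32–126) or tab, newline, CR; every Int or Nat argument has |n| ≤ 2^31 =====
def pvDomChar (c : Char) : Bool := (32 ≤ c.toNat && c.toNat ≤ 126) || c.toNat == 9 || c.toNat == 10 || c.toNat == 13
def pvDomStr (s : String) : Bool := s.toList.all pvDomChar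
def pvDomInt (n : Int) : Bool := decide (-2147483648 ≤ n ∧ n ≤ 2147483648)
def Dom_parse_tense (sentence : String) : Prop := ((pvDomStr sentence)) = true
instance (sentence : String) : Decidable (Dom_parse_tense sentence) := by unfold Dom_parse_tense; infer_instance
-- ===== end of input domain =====

-- B makes a single pass gathering flags and the last dictionary match instead of A's
-- repeated membership scans followed by a dictionary loop (objective: alternative).

-- module-level constant shared by both versions
def english_to_maori_tense : PySem.Dict String String :=
  PySem.Dict.ofList
    [("wants", "Kei te"), ("went", "I"), ("going", "Kei te"), ("made", "I"),
     ("making", "Kei te"), ("saw", "I"), ("seeing", "Kei te"), ("wanted", "I"),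
     ("want", "Kei te"), ("called", "I"), ("calling", "Kei te"), ("asked", "I"),
     ("asking", "Kei te"), ("read", "I"), ("reading", "Kei te"), ("learned", "I"),
     ("learning", "Kei te")]

-- ===== PORT A =====
def parse_tense (sentence : String) : Option String :=
  let words := PySem.Str.split₀ sentence
  if words.contains "will" then some "Ka"
  else if words.contains "am" then some "Kei te"
  else if words.contains "are" then some "Kei te"
  else if words.contains "is" then some "Kei te"
  else
    -- for word in words: if word in dict: tense = dict[word]
    words.foldl (fun t w =>
      match english_to_maori_tense.get? w with
      | some v => some v
      | none => t) none

-- ===== PORT B =====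
def pvStepB (st : Bool × Bool × Option String) (w : String) : Bool × Bool × Option String :=
  if w == "will" then (true, st.2.1, st.2.2)
  else if w == "am" || w == "are" || w == "is" then (st.1, true, st.2.2)
  else
    match english_to_maori_tense.get? w with
    | some t => (st.1, st.2.1, some t)
    | none => st

def parse_tense_alt (sentence : String) : Option String :=
  let st := (PySem.Str.split₀ sentence).foldl pvStepB (false, false, none)
  if st.1 then some "Ka"
  else if st.2.1 then some "Kei te"
  else st.2.2

-- ===== PRECONDITION & SPEC =====
def Spec_parse_tense (sentence : String) (out : Option String) : Prop := out = parse_tense_alt sentence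
instance (sentence : String) (out : Option String) : Decidable (Spec_parse_tense sentence out) := by unfold Spec_parse_tense; infer_instance

-- ===== CLAIM (what is proved, stated in full; the proofs are below) =====
def Claim_equal_parse_tense : Prop := ∀ (sentence : String), Dom_parse_tense sentence → Spec_parse_tense sentence (parse_tense sentence)

-- ===== LEMMAS AND PROOFS =====

-- step function of A's final loop, named for the lemmas
def pvStepA (t : Option String) (w : String) : Option String :=
  match english_to_maori_tense.get? w with
  | some v => some v
  | none => t

lemma pvLoopB (ws : List String) (sw sa : Bool) (l : Option String) :
    ws.foldl pvStepB (sw, sa, l)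
      = (sw || ws.contains "will",
         sa || (ws.contains "am" || ws.contains "are" || ws.contains "is"),
         ws.foldl pvStepA l) := by
  induction ws generalizing sw sa l with
  | nil => simp
  | cons w ws ih =>
    have g1 : english_to_maori_tense.get? "will" = none := by decide
    have g2 : english_to_maori_tense.get? "am" = none := by decide
    have g3 : english_to_maori_tense.get? "are" = none := by decide
    have g4 : english_to_maori_tense.get? "is" = none := by decide
    by_cases hw : w = "will"
    · subst hw
      simp [pvStepB, pvStepA, ih, g1]
    · by_cases ha : w = "am"
      · subst ha; simp [pvStepB, pvStepA, ih, g2]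
      · by_cases hr : w = "are"
        · subst hr; simp [pvStepB, pvStepA, ih, g3]
        · by_cases hi : w = "is"
          · subst hi; simp [pvStepB, pvStepA, ih, g4]
          · have hb : pvStepB (sw, sa, l) w =
                (sw, sa, pvStepA l w) := by
              simp only [pvStepB, pvStepA]
              rw [if_neg (by simp [hw]), if_neg (by simp [ha, hr, hi])]
              cases english_to_maori_tense.get? w <;> rfl
            simp only [List.foldl_cons, hb, ih, List.contains_cons]
            refine congrArg₂ _ ?_ (congrArg₂ _ ?_ rfl)
            · simp [hw, BEq.symm_false]
            · have b1 : ("am" == w) = false := by simp [Ne.symm ha]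
              have b2 : ("are" == w) = false := by simp [Ne.symm hr]
              have b3 : ("is" == w) = false := by simp [Ne.symm hi]
              simp [b1, b2, b3]

-- ===== VERDICT (by name: the statement is the Claim_ definition above) =====
theorem parse_tense_spec : Claim_equal_parse_tense := by
  intro sentence _
  unfold Spec_parse_tense parse_tense parse_tense_alt
  simp only [pvLoopB, Bool.false_or]
  set ws := PySem.Str.split₀ sentence
  cases hw : ws.contains "will" <;>
    cases ha : ws.contains "am" <;>
      cases hr : ws.contains "are" <;>
        cases hi : ws.contains "is" <;>
          simp
  rfl
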